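-- pv_equiv track=rewrite | github.com/AAlexeykuz/kuzobot | cogwheels/turing.py | compile_tape
-- ===== SOURCE A (Python) =====
-- def compile_tape(tape):
--     if len(tape.replace("0", "").replace("1", "").replace(" ", "")) != 0:
--         return None
--     output = dict()
--     for i in range(len(tape)):
--         if tape[i] in "01":
--             cell = int(tape[i])
--         else:
--             cell = None
--         output[i] = cell
--     return output
-- ===== SOURCE B (Python) =====
-- def compile_tape(tape):
--     output = {}
--     for i, c in enumerate(tape):
--         if c == "0":
--             output[i] = 0
--         elif c == "1":
--             output[i] = 1
--         elif c == " ":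
--             output[i] = None
--         else:
--             return None
--     return output
-- ===== Notes on version B (the rewrite author's own statement) =====
-- stated objective: simpler
-- what changed: Fuses A's replace-chain validation pass and its separate index-loop build pass into a single enumerate loop that builds the dict and returns None early on the first invalid character.
import Mathlib
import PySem

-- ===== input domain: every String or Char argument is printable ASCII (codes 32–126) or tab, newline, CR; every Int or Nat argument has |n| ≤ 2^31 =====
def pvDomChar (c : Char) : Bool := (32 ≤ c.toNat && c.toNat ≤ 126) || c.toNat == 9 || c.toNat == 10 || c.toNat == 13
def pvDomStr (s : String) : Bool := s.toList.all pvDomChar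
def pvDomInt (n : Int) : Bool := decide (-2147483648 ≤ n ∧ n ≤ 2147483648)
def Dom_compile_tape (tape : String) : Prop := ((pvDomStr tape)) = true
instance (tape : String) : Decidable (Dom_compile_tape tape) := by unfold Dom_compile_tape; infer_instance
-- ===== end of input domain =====

-- B fuses A's replace-chain validation and its second build loop into one pass with an early
-- exit on the first invalid character (objective: simpler, one scan instead of four).

-- ===== PORT A =====
def compile_tape (tape : String) : Option (List (Int × Option Int)) :=
  if PySem.Str.len (PySem.Str.replace (PySem.Str.replace (PySem.Str.replace tape "0" "") "1" "") " " "") ≠ 0 then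
    none
  else
    some (((PySem.List.pyRange 0 (PySem.Str.len tape) 1).foldl
        (fun output i =>
          output.insert i
            (match PySem.Str.pyGet? tape i with
             -- tape[i] in "01"; int(tape[i]) — exact on the single digit characters '0'/'1'
             | some c => if c = '0' || c = '1' then some (if c = '0' then (0 : Int) else 1) else none
             | none => none))  -- none is unreachable: i ∈ range(len(tape))
        (PySem.Dict.empty : PySem.Dict Int (Option Int))).items)

-- ===== PORT B =====
-- dict assignment at a fresh, strictly increasing key appends to the association list
def compileTapeGo (i : Int) (cs : List Char) (acc : List (Int × Option Int)) :
    Option (List (Int × Option Int)) :=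
  match cs with
  | [] => some acc
  | c :: rest =>
    if c = '0' then compileTapeGo (i + 1) rest (acc ++ [(i, some 0)])
    else if c = '1' then compileTapeGo (i + 1) rest (acc ++ [(i, some 1)])
    else if c = ' ' then compileTapeGo (i + 1) rest (acc ++ [(i, none)])
    else none

def compile_tape_alt (tape : String) : Option (List (Int × Option Int)) :=
  compileTapeGo 0 tape.toList []

-- ===== PRECONDITION & SPEC =====
def Spec_compile_tape (tape : String) (out : Option (List (Int × Option Int))) : Prop := out = compile_tape_alt tape
instance (tape : String) (out : Option (List (Int × Option Int))) : Decidable (Spec_compile_tape tape out) := by unfold Spec_compile_tape; infer_instance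

-- ===== CLAIM (what is proved, stated in full; the proofs are below) =====
def Claim_equal_compile_tape : Prop := ∀ (tape : String), Dom_compile_tape tape → Spec_compile_tape tape (compile_tape tape)

-- ===== LEMMAS AND PROOFS =====

-- the value stored for a valid tape character
def tapeVal (c : Char) : Option Int :=
  if c = '0' then some 0 else if c = '1' then some 1 else none

-- the association list both programs produce on a valid tape, starting at index i
def tapeSpec (i : Int) (cs : List Char) : List (Int × Option Int) :=
  match cs with
  | [] => []
  | c :: rest => (i, tapeVal c) :: tapeSpec (i + 1) rest

def validChar (c : Char) : Bool := c = '0' || c = '1' || c = ' '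

-- replacing a single character by the empty string is filtering it out
theorem replace_go_single (a : Char) :
    ∀ (fuel : Nat) (l acc : List Char), l.length ≤ fuel →
      PySem.Chars.replace.go [a] [] fuel l acc = acc.reverse ++ l.filter (fun c => !(c = a)) := by
  intro fuel
  induction fuel with
  | zero =>
    intro l acc h
    have : l = [] := List.length_eq_zero_iff.mp (Nat.le_zero.mp h)
    subst this; simp [PySem.Chars.replace.go]
  | succ n ih =>
    intro l acc h
    cases l with
    | nil => simp [PySem.Chars.replace.go]
    | cons c t =>
      by_cases hc : c = a
      · subst hc
        have : [c].isPrefixOf (c :: t) = true := by simp [List.isPrefixOf]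
        simp only [PySem.Chars.replace.go, this, if_pos]
        have hd : List.drop [c].length (c :: t) = t := by simp
        simp only [hd, List.reverse_nil, List.nil_append]
        rw [ih t acc (by simpa using Nat.succ_le_succ_iff.mp h)]
        simp
      · have : [a].isPrefixOf (c :: t) = false := by
          simp [List.isPrefixOf]; exact fun h' => hc h'.symm
        simp only [PySem.Chars.replace.go, this, Bool.false_eq_true, if_false]
        rw [ih t (c :: acc) (by simpa using Nat.succ_le_succ_iff.mp h)]
        simp [hc]

theorem replace_single (a : Char) (cs : List Char) :
    PySem.Chars.replace cs [a] [] = cs.filter (fun c => !(c = a)) := by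
  simp only [PySem.Chars.replace]
  rw [if_neg (by simp)]
  exact replace_go_single a cs.length cs [] le_rfl

-- A's guard is empty exactly when every character is a valid tape character
theorem guard_iff (cs : List Char) :
    ((cs.filter (fun c => !(c = '0'))).filter (fun c => !(c = '1'))).filter
        (fun c => !(c = ' ')) = [] ↔ ∀ c ∈ cs, validChar c = true := by
  rw [List.filter_filter, List.filter_filter, List.filter_eq_nil_iff]
  constructor
  · intro h c hc
    have := h c hc
    simp [validChar] at this ⊢
    tauto
  · intro h c hc
    have := h c hc
    simp [validChar] at this ⊢
    tauto

-- B's loop on a fully valid tape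
theorem go_valid : ∀ (cs : List Char) (i : Int) (acc : List (Int × Option Int)),
    (∀ c ∈ cs, validChar c = true) →
    compileTapeGo i cs acc = some (acc ++ tapeSpec i cs) := by
  intro cs
  induction cs with
  | nil => intro i acc _; simp [compileTapeGo, tapeSpec]
  | cons c rest ih =>
    intro i acc h
    have hc : validChar c = true := h c (by simp)
    have hrest : ∀ c' ∈ rest, validChar c' = true := fun c' hc' => h c' (by simp [hc'])
    simp only [validChar, Bool.or_eq_true, decide_eq_true_eq] at hc
    rcases hc with (h0 | h1) | hs
    · subst h0; simp [compileTapeGo, tapeSpec, tapeVal, ih _ _ hrest]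
    · by_cases h0 : c = '0'
      · subst h0; simp [compileTapeGo, tapeSpec, tapeVal, ih _ _ hrest]
      · subst h1; simp [compileTapeGo, tapeSpec, tapeVal, ih _ _ hrest]
    · by_cases h0 : c = '0'
      · subst h0; simp [compileTapeGo, tapeSpec, tapeVal, ih _ _ hrest]
      · by_cases h1 : c = '1'
        · subst h1; simp [compileTapeGo, tapeSpec, tapeVal, ih _ _ hrest]
        · subst hs; simp [compileTapeGo, tapeSpec, tapeVal, h0, h1, ih _ _ hrest]

-- B's loop hits an invalid character
theorem go_invalid : ∀ (cs : List Char) (i : Int) (acc : List (Int × Option Int)),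
    (∃ c ∈ cs, validChar c = false) →
    compileTapeGo i cs acc = none := by
  intro cs
  induction cs with
  | nil => intro i acc h; simp at h
  | cons c rest ih =>
    intro i acc h
    by_cases hc : validChar c = true
    · have : ∃ c' ∈ rest, validChar c' = false := by
        rcases h with ⟨c', hmem, hv⟩
        rcases List.mem_cons.mp hmem with rfl | hm
        · exact absurd hc (by simp [hv])
        · exact ⟨c', hm, hv⟩
      simp only [validChar, Bool.or_eq_true, decide_eq_true_eq] at hc
      rcases hc with (h0 | h1) | hs
      · subst h0; simp [compileTapeGo, ih _ _ this]
      · subst h1; simp [compileTapeGo, ih _ _ this]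
      · subst hs; simp [compileTapeGo, ih _ _ this]
    · simp only [validChar, Bool.or_eq_true, decide_eq_true_eq, not_or] at hc
      push_neg at hc
      simp [compileTapeGo, hc.1, hc.2]

-- A's map over pyRange is tapeSpec on the corresponding suffix
theorem map_pyRange_eq_tapeSpec (full : List Char) :
    ∀ (cs : List Char) (k : Nat), full.drop k = cs →
    (∀ c ∈ cs, validChar c = true) →
    (PySem.List.pyRange (k : Int) (full.length : Int) 1).map
        (fun i => (i,
          match PySem.List.pyGet? full i with
          | some c => if c = '0' || c = '1' then some (if c = '0' then (0 : Int) else 1) else none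
          | none => none))
      = tapeSpec (k : Int) cs := by
  intro cs
  induction cs with
  | nil =>
    intro k hdrop _
    have hk : full.length ≤ k := List.drop_eq_nil_iff.mp hdrop
    rw [PySem.List.pyRange_one_eq_nil (by exact_mod_cast hk)]
    simp [tapeSpec]
  | cons c rest ih =>
    intro k hdrop hvalid
    have hklt : k < full.length := by
      have := congrArg List.length hdrop
      simp [List.length_drop] at this
      omega
    have hget : full[k]? = some c := by
      have h0 : (full.drop k)[0]? = some c := by rw [hdrop]; rfl
      rw [List.getElem?_drop] at h0
      simpa using h0
    rw [PySem.List.pyRange_one_cons (by exact_mod_cast hklt)]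
    simp only [List.map_cons, PySem.List.pyGet?_natCast, hget]
    have hrest : full.drop (k + 1) = rest := by
      have : full.drop (k + 1) = (full.drop k).drop 1 := by
        rw [List.drop_drop]
      rw [this, hdrop]; simp
    have ihr := ih (k + 1) hrest (fun c' hc' => hvalid c' (by simp [hc']))
    have hcast : ((k : Int) + 1) = ((k + 1 : Nat) : Int) := by push_cast; ring
    rw [hcast, ihr]
    have hc : validChar c = true := hvalid c (by simp)
    simp only [validChar, Bool.or_eq_true, decide_eq_true_eq] at hc
    show ((k : Int), _) :: _ = tapeSpec (k : Int) (c :: rest)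
    simp only [tapeSpec, tapeVal]
    rcases hc with (h0 | h1) | hs
    · subst h0; simp
    · by_cases h0 : c = '0'
      · subst h0; simp
      · subst h1; simp [h0]
    · by_cases h0 : c = '0'
      · subst h0; simp
      · by_cases h1 : c = '1'
        · subst h1; simp [h0]
        · subst hs; simp [h0, h1]

-- ===== VERDICT (by name: the statement is the Claim_ definition above) =====
theorem compile_tape_spec : Claim_equal_compile_tape := by
  intro tape _
  unfold Spec_compile_tape compile_tape compile_tape_alt
  have hchain :
      (PySem.Str.replace (PySem.Str.replace (PySem.Str.replace tape "0" "") "1" "") " " "").toList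
        = ((tape.toList.filter (fun c => !(c = '0'))).filter (fun c => !(c = '1'))).filter
            (fun c => !(c = ' ')) := by
    simp only [PySem.Str.toList_replace, show ("0" : String).toList = ['0'] from rfl,
      show ("1" : String).toList = ['1'] from rfl, show (" " : String).toList = [' '] from rfl,
      show ("" : String).toList = [] from rfl]
    rw [replace_single, replace_single, replace_single]
  by_cases hv : ∀ c ∈ tape.toList, validChar c = true
  · have hnil := (guard_iff tape.toList).mpr hv
    have hguard : PySem.Str.len
        (PySem.Str.replace (PySem.Str.replace (PySem.Str.replace tape "0" "") "1" "") " " "") = 0 := by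
      rw [PySem.Str.len_eq, hchain, hnil]; simp
    rw [if_neg (fun h => h hguard)]
    rw [go_valid tape.toList 0 [] hv]
    have h1 : ((PySem.List.pyRange 0 (PySem.Str.len tape) 1).foldl
        (fun output i =>
          output.insert i
            (match PySem.Str.pyGet? tape i with
             | some c => if c = '0' || c = '1' then some (if c = '0' then (0 : Int) else 1) else none
             | none => none))
        (PySem.Dict.empty : PySem.Dict Int (Option Int))).items
        = [] ++ (PySem.List.pyRange 0 (PySem.Str.len tape) 1).map
            (fun i => (i,
              match PySem.Str.pyGet? tape i with
              | some c => if c = '0' || c = '1' then some (if c = '0' then (0 : Int) else 1) else none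
              | none => none)) :=
      PySem.Dict.items_foldl_insert_fresh _ (fun i => i) _ PySem.Dict.empty
        (by simp)
        (by have := PySem.List.nodup_pyRange_one 0 (PySem.Str.len tape); simpa using this)
    rw [h1, List.nil_append]
    have hmap := map_pyRange_eq_tapeSpec tape.toList tape.toList 0 (by simp) hv
    simp only [Nat.cast_zero] at hmap
    rw [PySem.Str.len_eq, ← hmap]
    simp only [PySem.Str.pyGet?_eq, PySem.Chars.pyGet?_eq_listPyGet?, List.nil_append]
  · push_neg at hv
    have hguard :
        ((tape.toList.filter (fun c => !(c = '0'))).filter (fun c => !(c = '1'))).filter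
            (fun c => !(c = ' ')) ≠ [] := by
      intro hnil
      rcases hv with ⟨c, hc, hval⟩
      exact hval ((guard_iff tape.toList).mp hnil c hc)
    rw [if_pos (by
      rw [PySem.Str.len_eq, hchain]
      simpa using fun h => hguard (List.length_eq_zero_iff.mp h))]
    rcases hv with ⟨c, hc, hval⟩
    rw [go_invalid tape.toList 0 [] ⟨c, hc, by simpa using hval⟩]
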